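-- pv_equiv track=rewrite | github.com/matejklemen/slonspell | prepare_dataset_functions/make_text_incorrect_functions.py | add_spaces_before_and_after_punctuation
-- ===== SOURCE A (Python) =====
-- import string
--
-- def add_spaces_before_and_after_punctuation(text):
--     punctuation = set(string.punctuation)
--
--     # Initialize an empty string to store the modified text
--     modified_text = ""
--
--     # Loop through each character in the text
--     for char in text:
--         # If the character is a punctuation mark
--         if char in punctuation:
--             # Add a space before and after the punctuation mark
--             modified_text += " " + char + " "
--         else:
--             # Otherwise, just add the character to the modified text
--             modified_text += char
--
--     # Return the modified text
--     return modified_text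
-- ===== SOURCE B (Python) =====
-- import string
--
--
-- def add_spaces_before_and_after_punctuation(text):
--     # Inverted loop: one full-string replace pass per punctuation mark,
--     # instead of scanning the text character by character.
--     # Correct because the padding (spaces) and already-processed marks are
--     # never themselves rewritten by a later, distinct punctuation mark.
--     for p in string.punctuation:
--         text = text.replace(p, " " + p + " ")
--     return text
-- ===== Notes on version B (the rewrite author's own statement) =====
-- stated objective: alternative
-- what changed: Inverts the loop structure: instead of a single character-by-character scan with an if/else string accumulator, B iterates over the 32 punctuation marks and performs one whole-string replace pass per mark.
import Mathlib
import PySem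

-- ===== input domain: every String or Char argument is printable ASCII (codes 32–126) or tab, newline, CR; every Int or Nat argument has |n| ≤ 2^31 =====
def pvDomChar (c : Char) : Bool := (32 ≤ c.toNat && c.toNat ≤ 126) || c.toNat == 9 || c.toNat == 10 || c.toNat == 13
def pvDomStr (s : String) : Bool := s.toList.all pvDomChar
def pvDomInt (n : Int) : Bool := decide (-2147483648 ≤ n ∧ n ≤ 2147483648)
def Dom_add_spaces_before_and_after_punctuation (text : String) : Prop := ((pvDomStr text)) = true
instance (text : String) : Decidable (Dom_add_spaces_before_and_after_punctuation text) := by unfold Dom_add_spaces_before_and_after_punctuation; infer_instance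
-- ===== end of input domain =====

-- B inverts the loop structure: one whole-string replace pass per punctuation
-- mark instead of a character-by-character scan with an if/else accumulator.

-- string.punctuation
def pyPunctuation : List Char := "!\"#$%&'()*+,-./:;<=>?@[\\]^_`{|}~".toList

-- ===== PORT A =====
def add_spaces_before_and_after_punctuation (text : String) : String :=
  let punctuation : PySem.Set Char := PySem.Set.ofList pyPunctuation
  String.ofList (text.toList.foldl (fun modified_text char =>
    if PySem.Set.contains punctuation char then
      modified_text ++ (' ' :: char :: [' '])
    else
      modified_text ++ [char]) [])

-- ===== PORT B =====
-- for p in string.punctuation: text = text.replace(p, " " + p + " ")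
def add_spaces_before_and_after_punctuation_alt (text : String) : String :=
  pyPunctuation.foldl
    (fun text p => PySem.Str.replace text (String.ofList [p]) (String.ofList (' ' :: p :: [' ']))) text

-- ===== PRECONDITION & SPEC =====
def Spec_add_spaces_before_and_after_punctuation (text : String) (out : String) : Prop := out = add_spaces_before_and_after_punctuation_alt text
instance (text : String) (out : String) : Decidable (Spec_add_spaces_before_and_after_punctuation text out) := by unfold Spec_add_spaces_before_and_after_punctuation; infer_instance

-- ===== CLAIM (what is proved, stated in full; the proofs are below) =====
def Claim_equal_add_spaces_before_and_after_punctuation : Prop := ∀ (text : String), Dom_add_spaces_before_and_after_punctuation text → Spec_add_spaces_before_and_after_punctuation text (add_spaces_before_and_after_punctuation text)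

-- ===== LEMMAS AND PROOFS =====

-- single-character pattern: replace.go is a per-character substitution
theorem replace_go_single (p : Char) (new : List Char) :
    ∀ (l : List Char) (fuel : Nat) (acc : List Char), l.length ≤ fuel →
      PySem.Chars.replace.go [p] new fuel l acc
        = acc.reverse ++ l.flatMap (fun c => if c = p then new else [c]) := by
  intro l
  induction l with
  | nil =>
    intro fuel acc _
    cases fuel <;> simp [PySem.Chars.replace.go]
  | cons c t ih =>
    intro fuel acc hle
    cases fuel with
    | zero => simp at hle
    | succ f =>
      have hlt : t.length ≤ f := by simpa using hle
      by_cases hc : c = p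
      · subst hc
        simp only [PySem.Chars.replace.go, List.isPrefixOf, BEq.rfl, Bool.true_and,
          if_true, List.length_cons, List.drop_succ_cons,
          List.length_nil, List.drop_zero]
        rw [ih f (new.reverse ++ acc) hlt]
        simp
      · have hbe : (p == c) = false := by
          exact beq_false_of_ne (fun h => hc (h.symm))
        simp only [PySem.Chars.replace.go, List.isPrefixOf, hbe, Bool.false_and]
        rw [ih f (c :: acc) hlt]
        simp [hc]

theorem replace_single (p : Char) (new l : List Char) :
    PySem.Chars.replace l [p] new
      = l.flatMap (fun c => if c = p then new else [c]) := by
  simp only [PySem.Chars.replace, List.isEmpty_cons, if_false, Bool.false_eq_true]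
  simpa using replace_go_single p new l l.length [] le_rfl

-- the staged passes over a nodup, space-free list of marks = one combined substitution
theorem fold_replace (ps : List Char) (hnd : ps.Nodup) (hsp : ' ' ∉ ps) :
    ∀ l : List Char,
      ps.foldl (fun t p => PySem.Chars.replace t [p] (' ' :: p :: [' '])) l
        = l.flatMap (fun c => if c ∈ ps then ' ' :: c :: [' '] else [c]) := by
  induction ps with
  | nil => intro l; simp
  | cons q rest ih =>
    intro l
    have hqrest : q ∉ rest := (List.nodup_cons.mp hnd).1
    have hndr : rest.Nodup := (List.nodup_cons.mp hnd).2
    have hspr : ' ' ∉ rest := fun h => hsp (List.mem_cons_of_mem _ h)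
    have hqs : ' ' ∉ (q :: rest) := hsp
    simp only [List.foldl_cons]
    rw [replace_single, ih hndr hspr, List.flatMap_assoc]
    apply List.flatMap_congr  -- pointwise equality of the substitutions
    intro c _
    by_cases hc : c = q
    · subst hc
      simp [hqrest, hspr, List.flatMap_cons]
    · simp [hc, List.mem_cons]

-- B's string-level fold computes the list-level fold
theorem alt_toList (text : String) :
    (add_spaces_before_and_after_punctuation_alt text).toList
      = pyPunctuation.foldl (fun t p => PySem.Chars.replace t [p] (' ' :: p :: [' ']))
          text.toList := by
  unfold add_spaces_before_and_after_punctuation_alt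
  generalize pyPunctuation = ps
  induction ps generalizing text with
  | nil => simp
  | cons q rest ih =>
    simp only [List.foldl_cons]
    rw [ih]
    simp [PySem.Str.toList_replace, String.toList_ofList]

-- ===== VERDICT (by name: the statement is the Claim_ definition above) =====
theorem add_spaces_before_and_after_punctuation_spec : Claim_equal_add_spaces_before_and_after_punctuation := by
  intro text _
  unfold Spec_add_spaces_before_and_after_punctuation
  have hnd : pyPunctuation.Nodup := by decide
  have hsp : ' ' ∉ pyPunctuation := by decide
  have hB : (add_spaces_before_and_after_punctuation_alt text).toList
      = text.toList.flatMap (fun c => if c ∈ pyPunctuation then ' ' :: c :: [' '] else [c]) := by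
    rw [alt_toList, fold_replace pyPunctuation hnd hsp]
  have hA : add_spaces_before_and_after_punctuation text
      = String.ofList (text.toList.flatMap
          (fun c => if c ∈ pyPunctuation then ' ' :: c :: [' '] else [c])) := by
    unfold add_spaces_before_and_after_punctuation
    have h1 : (text.toList.foldl (fun acc c =>
          if PySem.Set.contains (PySem.Set.ofList pyPunctuation) c then
            acc ++ (' ' :: c :: [' ']) else acc ++ [c]) ([] : List Char))
        = text.toList.foldl (fun acc c =>
            acc ++ (if c ∈ pyPunctuation then ' ' :: c :: [' '] else [c])) [] := by
      apply PySem.List.foldl_congr_mem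
      intro acc c _
      by_cases h : c ∈ pyPunctuation
      · simp [h, PySem.Set.contains, PySem.Set.mem_ofList]
      · simp [h, PySem.Set.contains, PySem.Set.mem_ofList]
    simp only [h1]
    exact congrArg String.ofList
      (by rw [PySem.List.foldl_append_eq_flatMap]; simp)
  rw [hA, ← hB, String.ofList_toList]
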